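-- pv_equiv track=rewrite | github.com/PSSalgado/FoldKit | ranking/dalilite_matrix.py | _matrix_from_ncore
-- ===== SOURCE A (Python) =====
-- def _matrix_from_ncore(labels: list[str], n_core: dict[tuple[str, str], int]) -> list[list[int | float | None]]:
--     m: list[list[int | float | None]] = []
--     for i, la in enumerate(labels):
--         row: list[int | float | None] = []
--         for j, lb in enumerate(labels):
--             if i == j:
--                 row.append(None)
--                 continue
--             v = n_core.get((la, lb), n_core.get((lb, la)))
--             row.append(int(v) if v is not None else None)
--         m.append(row)
--     return m
-- ===== SOURCE B (Python) =====
-- def _matrix_from_ncore(labels: list[str], n_core: dict[tuple[str, str], int]) -> list[list[int | float | None]]: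
--     # Index each label to ALL of its positions, then scatter the sparse dict
--     # into a None-initialised dense matrix: reverse keys first, forward keys
--     # second, so a forward key (row-label, col-label) wins over the reverse one.
--     pos: dict[str, list[int]] = {}
--     for i, la in enumerate(labels):
--         pos.setdefault(la, []).append(i)
--     n = len(labels)
--     m: list[list[int | float | None]] = [[None] * n for _ in range(n)]
--     for (a, b), v in n_core.items():
--         for ib in pos.get(b, []):
--             for ia in pos.get(a, []):
--                 if ia != ib:
--                     m[ib][ia] = int(v)
--     for (a, b), v in n_core.items():
--         for ia in pos.get(a, []):
--             for ib in pos.get(b, []):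
--                 if ia != ib:
--                     m[ia][ib] = int(v)
--     return m
-- ===== Notes on version B (the rewrite author's own statement) =====
-- stated objective: faster
-- what changed: Instead of scanning all n^2 label pairs and doing two dict lookups per cell, B builds a label->positions index once and scatters the sparse n_core dict into a None-initialised dense matrix in two ordered passes (reverse keys first, forward keys second so a forward key wins).
import Mathlib
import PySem

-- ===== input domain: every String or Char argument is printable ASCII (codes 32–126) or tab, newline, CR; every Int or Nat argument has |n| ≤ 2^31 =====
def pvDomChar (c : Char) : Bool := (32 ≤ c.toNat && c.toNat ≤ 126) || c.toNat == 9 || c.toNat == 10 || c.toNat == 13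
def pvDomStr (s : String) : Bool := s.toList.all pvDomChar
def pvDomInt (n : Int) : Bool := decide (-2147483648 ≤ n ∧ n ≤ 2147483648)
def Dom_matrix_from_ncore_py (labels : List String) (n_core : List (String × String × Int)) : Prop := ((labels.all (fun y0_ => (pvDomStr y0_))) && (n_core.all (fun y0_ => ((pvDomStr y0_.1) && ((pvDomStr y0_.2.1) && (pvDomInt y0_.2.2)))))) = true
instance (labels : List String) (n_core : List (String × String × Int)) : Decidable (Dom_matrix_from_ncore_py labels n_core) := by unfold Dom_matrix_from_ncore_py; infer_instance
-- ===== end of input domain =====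

-- B replaces A's n^2 scan with two dict lookups per cell by a label->positions
-- index plus a two-pass scatter of the sparse dict into a None-initialised
-- dense matrix (return value only; neither version mutates its arguments).

-- ===== PORT A =====
-- enumerate indices are ported as Nat via List.zipIdx (Python's enumerate here
-- yields 0,1,2,…, only compared for equality); int(v) on an int is the identity.
def matrix_from_ncore_py (labels : List String) (n_core : List (String × String × Int)) : List (List (Option Int)) :=
  let d : PySem.Dict (String × String) Int := PySem.Dict.mk (n_core.map (fun p => ((p.1, p.2.1), p.2.2)))
  labels.zipIdx.foldl (fun m pi =>
    m ++ [labels.zipIdx.foldl (fun row pj =>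
      if pi.2 = pj.2 then row ++ [(none : Option Int)]
      else row ++ [(d.get? (pi.1, pj.1)).orElse (fun _ => d.get? (pj.1, pi.1))]) []]) []

-- ===== PORT B =====
-- m[r][c] = v on a functional matrix (no-op when out of range; B only writes in range)
def pvUpd (m : List (List (Option Int))) (r c : Nat) (v : Int) : List (List (Option Int)) :=
  m.set r ((m.getD r []).set c (some v))

-- pos: each label mapped to ALL of its positions (pos.setdefault(la, []).append(i))
def pvPos (labels : List String) : PySem.Dict String (List Nat) :=
  labels.zipIdx.foldl (fun d p => d.modify p.1 [] (fun xs => xs ++ [p.2])) PySem.Dict.empty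

-- first loop of Source B: reverse cells m[ib][ia] = int(v)
def pvRevPass (pos : PySem.Dict String (List Nat)) (n_core : List (String × String × Int))
    (m : List (List (Option Int))) : List (List (Option Int)) :=
  n_core.foldl (fun m p =>
    (pos.getD p.2.1 []).foldl (fun m ib =>
      (pos.getD p.1 []).foldl (fun m ia =>
        if ia ≠ ib then pvUpd m ib ia p.2.2 else m) m) m) m

-- second loop of Source B: forward cells m[ia][ib] = int(v) (overwrites reverse ones)
def pvFwdPass (pos : PySem.Dict String (List Nat)) (n_core : List (String × String × Int))
    (m : List (List (Option Int))) : List (List (Option Int)) :=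
  n_core.foldl (fun m p =>
    (pos.getD p.1 []).foldl (fun m ia =>
      (pos.getD p.2.1 []).foldl (fun m ib =>
        if ia ≠ ib then pvUpd m ia ib p.2.2 else m) m) m) m

def matrix_from_ncore_py_alt (labels : List String) (n_core : List (String × String × Int)) : List (List (Option Int)) :=
  pvFwdPass (pvPos labels) n_core
    (pvRevPass (pvPos labels) n_core
      (List.replicate labels.length (List.replicate labels.length (none : Option Int))))

-- ===== PRECONDITION & SPEC =====
-- Pre_ excludes only association lists with a duplicated (a, b) key: a real
-- Python dict cannot contain duplicate keys, so such lists represent no input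
-- of A; they are an artefact of the List-encoding of dict (on them A's
-- first-match lookup and B's later-write-wins scatter may disagree).
def Pre_matrix_from_ncore_py (labels : List String) (n_core : List (String × String × Int)) : Prop :=
  (n_core.map (fun p => (p.1, p.2.1))).Nodup
instance (labels : List String) (n_core : List (String × String × Int)) : Decidable (Pre_matrix_from_ncore_py labels n_core) := by unfold Pre_matrix_from_ncore_py; infer_instance

def pvWitness_matrix_from_ncore_py : List String × (List (String × String × Int)) :=
  (["a", "b", "c"], [("a", "b", 4), ("c", "b", 7)])

def Spec_matrix_from_ncore_py (labels : List String) (n_core : List (String × String × Int)) (out : List (List (Option Int))) : Prop := out = matrix_from_ncore_py_alt labels n_core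
instance (labels : List String) (n_core : List (String × String × Int)) (out : List (List (Option Int))) : Decidable (Spec_matrix_from_ncore_py labels n_core out) := by unfold Spec_matrix_from_ncore_py; infer_instance

-- ===== CLAIM (what is proved, stated in full; the proofs are below) =====
def Claim_equal_matrix_from_ncore_py : Prop := ∀ (labels : List String) (n_core : List (String × String × Int)), Dom_matrix_from_ncore_py labels n_core → Pre_matrix_from_ncore_py labels n_core → Spec_matrix_from_ncore_py labels n_core (matrix_from_ncore_py labels n_core)

-- ===== LEMMAS AND PROOFS =====

-- the value of cell (i, j) of a matrix
def pvCell (m : List (List (Option Int))) (i j : Nat) : Option Int := (m.getD i []).getD j none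

-- well-formed n×n matrix
def pvShape (n : Nat) (m : List (List (Option Int))) : Prop :=
  m.length = n ∧ ∀ row ∈ m, row.length = n

lemma pvShape_upd {n : Nat} {m : List (List (Option Int))} (h : pvShape n m) (r c : Nat) (v : Int) :
    pvShape n (pvUpd m r c v) := by
  obtain ⟨hlen, hrow⟩ := h
  by_cases hr : r < m.length
  · refine ⟨by simp [pvUpd, hlen], ?_⟩
    intro row hmem
    rcases List.mem_or_eq_of_mem_set hmem with hm | he
    · exact hrow row hm
    · subst he
      rw [List.length_set, List.getD_eq_getElem?_getD, List.getElem?_eq_getElem hr]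
      exact hrow _ (List.getElem_mem hr)
  · rw [pvUpd, List.set_eq_of_length_le (by omega)]
    exact ⟨hlen, hrow⟩

lemma pvShape_foldl {α : Type} {n : Nat} (f : List (List (Option Int)) → α → List (List (Option Int)))
    (hf : ∀ m x, pvShape n m → pvShape n (f m x)) (l : List α) {m : List (List (Option Int))}
    (h : pvShape n m) : pvShape n (l.foldl f m) := by
  induction l generalizing m with
  | nil => exact h
  | cons x l ih => exact ih (hf m x h)

lemma pvCell_upd {n : Nat} {m : List (List (Option Int))} (h : pvShape n m)
    {i j : Nat} (hi : i < n) (hj : j < n) (r c : Nat) (v : Int) :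
    pvCell (pvUpd m r c v) i j = if r = i ∧ c = j then some v else pvCell m i j := by
  obtain ⟨hlen, hrow⟩ := h
  have him : i < m.length := by omega
  by_cases hri : r = i
  · subst hri
    have hgd : m.getD r [] = m[r] := by
      rw [List.getD_eq_getElem?_getD, List.getElem?_eq_getElem him]; rfl
    have hrln : m[r].length = n := hrow _ (List.getElem_mem him)
    by_cases hcj : c = j
    · subst hcj
      simp [pvCell, pvUpd, List.getD_eq_getElem?_getD, him, hrln, hj]
    · simp [pvCell, pvUpd, List.getD_eq_getElem?_getD, him, hcj]
  · simp [pvCell, pvUpd, List.getD_eq_getElem?_getD, hri]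

-- cell after a column loop writing row rr (guard `c ≠ rr`, rev pass shape)
lemma pvCell_colfold {n : Nat} {m : List (List (Option Int))} (h : pvShape n m)
    {i j : Nat} (hi : i < n) (hj : j < n) (rr : Nat) (C : List Nat) (v : Int) :
    pvCell (C.foldl (fun m c => if c ≠ rr then pvUpd m rr c v else m) m) i j
      = if rr = i ∧ j ∈ C ∧ j ≠ rr then some v else pvCell m i j := by
  induction C generalizing m with
  | nil => simp
  | cons c C ih =>
    rw [List.foldl_cons]
    have h' : pvShape n (if c ≠ rr then pvUpd m rr c v else m) := by
      split_ifs
      · exact pvShape_upd h rr c v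
      · exact h
    rw [ih h']
    have hm' : pvCell (if c ≠ rr then pvUpd m rr c v else m) i j
        = if rr = i ∧ c = j ∧ c ≠ rr then some v else pvCell m i j := by
      by_cases hcr : c ≠ rr
      · rw [if_pos hcr, pvCell_upd h hi hj]
        by_cases h1 : rr = i <;> by_cases h2 : c = j <;> simp_all
      · rw [if_neg hcr]
        simp_all
    rw [hm']
    by_cases h1 : rr = i <;> by_cases h2 : j ∈ C <;> by_cases h3 : j = c <;>
      by_cases h4 : j = rr <;> simp_all [List.mem_cons] <;> (first | (intro h5; omega) | omega | (split_ifs <;> first | rfl | omega))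

-- same with guard written `rr ≠ c` (fwd pass shape)
lemma pvCell_colfold' {n : Nat} {m : List (List (Option Int))} (h : pvShape n m)
    {i j : Nat} (hi : i < n) (hj : j < n) (rr : Nat) (C : List Nat) (v : Int) :
    pvCell (C.foldl (fun m c => if rr ≠ c then pvUpd m rr c v else m) m) i j
      = if rr = i ∧ j ∈ C ∧ rr ≠ j then some v else pvCell m i j := by
  induction C generalizing m with
  | nil => simp
  | cons c C ih =>
    rw [List.foldl_cons]
    have h' : pvShape n (if rr ≠ c then pvUpd m rr c v else m) := by
      split_ifs
      · exact pvShape_upd h rr c v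
      · exact h
    rw [ih h']
    have hm' : pvCell (if rr ≠ c then pvUpd m rr c v else m) i j
        = if rr = i ∧ c = j ∧ rr ≠ c then some v else pvCell m i j := by
      by_cases hcr : rr ≠ c
      · rw [if_pos hcr, pvCell_upd h hi hj]
        by_cases h1 : rr = i <;> by_cases h2 : c = j <;> simp_all
      · rw [if_neg hcr]
        simp_all
    rw [hm']
    by_cases h1 : rr = i <;> by_cases h2 : j ∈ C <;> by_cases h3 : j = c <;>
      by_cases h4 : j = rr <;> simp_all [List.mem_cons] <;> (first | (intro h5; omega) | omega | (split_ifs <;> first | rfl | omega))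

-- cell after the double loop of one reverse-pass item
lemma pvCell_double {n : Nat} {m : List (List (Option Int))} (h : pvShape n m)
    {i j : Nat} (hi : i < n) (hj : j < n) (R C : List Nat) (v : Int) :
    pvCell (R.foldl (fun m r => C.foldl (fun m c => if c ≠ r then pvUpd m r c v else m) m) m) i j
      = if i ∈ R ∧ j ∈ C ∧ j ≠ i then some v else pvCell m i j := by
  induction R generalizing m with
  | nil => simp
  | cons r R ih =>
    rw [List.foldl_cons]
    have hf : pvShape n (C.foldl (fun m c => if c ≠ r then pvUpd m r c v else m) m) :=
      pvShape_foldl _ (fun m c hm => by split_ifs; exacts [pvShape_upd hm _ _ _, hm]) C h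
    rw [ih hf, pvCell_colfold h hi hj]
    by_cases h1 : i = r <;> by_cases h2 : i ∈ R <;> by_cases h3 : j ∈ C <;>
      by_cases h4 : j = i <;> simp_all [List.mem_cons] <;>
      (first | (intro h5; omega) | omega | (split_ifs <;> first | rfl | omega))

-- cell after the double loop of one forward-pass item
lemma pvCell_double' {n : Nat} {m : List (List (Option Int))} (h : pvShape n m)
    {i j : Nat} (hi : i < n) (hj : j < n) (R C : List Nat) (v : Int) :
    pvCell (R.foldl (fun m r => C.foldl (fun m c => if r ≠ c then pvUpd m r c v else m) m) m) i j
      = if i ∈ R ∧ j ∈ C ∧ i ≠ j then some v else pvCell m i j := by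
  induction R generalizing m with
  | nil => simp
  | cons r R ih =>
    rw [List.foldl_cons]
    have hf : pvShape n (C.foldl (fun m c => if r ≠ c then pvUpd m r c v else m) m) :=
      pvShape_foldl _ (fun m c hm => by split_ifs; exacts [pvShape_upd hm _ _ _, hm]) C h
    rw [ih hf, pvCell_colfold' h hi hj]
    by_cases h1 : i = r <;> by_cases h2 : i ∈ R <;> by_cases h3 : j ∈ C <;>
      by_cases h4 : j = i <;> simp_all [List.mem_cons] <;>
      (first | (intro h5; omega) | omega | (split_ifs <;> first | rfl | omega))

lemma pv_mem_pos (labels : List String) (la : String) (x : Nat) :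
    x ∈ (pvPos labels).getD la [] ↔ labels[x]? = some la := by
  unfold pvPos
  rw [PySem.Dict.getD_foldl_modify_append]
  simp only [PySem.Dict.getD_empty, List.nil_append, List.mem_map, List.mem_filter,
    beq_iff_eq]
  constructor
  · rintro ⟨⟨a, b⟩, ⟨hmem, h1⟩, h2⟩
    subst h1; subst h2
    simpa using List.mem_zipIdx_iff_getElem?.1 hmem
  · intro hx
    exact ⟨(la, x), ⟨List.mem_zipIdx_iff_getElem?.2 (by simpa), rfl⟩, rfl⟩

-- cell after the whole reverse pass
lemma pvCell_revPass (labels : List String) (lst : List (String × String × Int))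
    (hnd : (lst.map (fun p => (p.1, p.2.1))).Nodup)
    {m : List (List (Option Int))} (h : pvShape labels.length m)
    {i j : Nat} (hi : i < labels.length) (hj : j < labels.length) :
    pvCell (pvRevPass (pvPos labels) lst m) i j
      = (if i ≠ j then (PySem.Dict.mk (lst.map (fun p => ((p.1, p.2.1), p.2.2)))).get? (labels[j], labels[i]) else none).or (pvCell m i j) := by
  induction lst generalizing m with
  | nil =>
    have hget : (PySem.Dict.mk ([] : List ((String × String) × Int))).get? (labels[j], labels[i]) = none := rfl
    simp only [pvRevPass, List.foldl_nil, List.map_nil, hget]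
    split_ifs <;> simp
  | cons p lst ih =>
    have hnd2 := hnd
    rw [List.map_cons, List.nodup_cons] at hnd2
    obtain ⟨hhead, hnd'⟩ := hnd2
    have hstep : pvRevPass (pvPos labels) (p :: lst) m
        = pvRevPass (pvPos labels) lst
            (((pvPos labels).getD p.2.1 []).foldl (fun m ib =>
              (((pvPos labels).getD p.1 []).foldl (fun m ia =>
                if ia ≠ ib then pvUpd m ib ia p.2.2 else m) m)) m) := rfl
    have hm1 : pvShape labels.length
        (((pvPos labels).getD p.2.1 []).foldl (fun m ib =>
          (((pvPos labels).getD p.1 []).foldl (fun m ia =>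
            if ia ≠ ib then pvUpd m ib ia p.2.2 else m) m)) m) := by
      refine pvShape_foldl _ (fun m ib hm => ?_) _ h
      refine pvShape_foldl _ (fun m ia hm => ?_) _ hm
      split_ifs
      exacts [pvShape_upd hm _ _ _, hm]
    rw [hstep, ih hnd' hm1, pvCell_double h hi hj]
    simp only [pv_mem_pos, List.getElem?_eq_getElem hi, List.getElem?_eq_getElem hj,
      Option.some_inj, List.map_cons, PySem.Dict.get?_mk_cons]
    by_cases hij : i = j
    · subst hij
      simp
    · by_cases hk : p.1 = labels[j] ∧ p.2.1 = labels[i]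
      · have hbeq : (((p.1, p.2.1) : String × String) == (labels[j], labels[i])) = true := by
          rw [beq_iff_eq]
          exact Prod.ext hk.1 hk.2
        have htail : (PySem.Dict.mk (lst.map (fun p => ((p.1, p.2.1), p.2.2)))).get? (p.1, p.2.1) = none := by
          rw [PySem.Dict.get?_eq_none_iff_not_mem_keys, PySem.Dict.keys_mk]
          simpa [Function.comp] using hhead
        simp [hij, hk.1.symm, hk.2.symm, hbeq, htail, Ne.symm hij]
      · have hbeq : (((p.1, p.2.1) : String × String) == (labels[j], labels[i])) = false := by
          rw [beq_eq_false_iff_ne]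
          intro he
          exact hk ⟨congrArg Prod.fst he, congrArg Prod.snd he⟩
        have hcond : ¬ (labels[i] = p.2.1 ∧ labels[j] = p.1 ∧ j ≠ i) := by
          rintro ⟨h1, h2, _⟩
          exact hk ⟨h2.symm, h1.symm⟩
        rw [if_neg hcond]
        simp [hbeq]

-- cell after the whole forward pass
lemma pvCell_fwdPass (labels : List String) (lst : List (String × String × Int))
    (hnd : (lst.map (fun p => (p.1, p.2.1))).Nodup)
    {m : List (List (Option Int))} (h : pvShape labels.length m)
    {i j : Nat} (hi : i < labels.length) (hj : j < labels.length) :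
    pvCell (pvFwdPass (pvPos labels) lst m) i j
      = (if i ≠ j then (PySem.Dict.mk (lst.map (fun p => ((p.1, p.2.1), p.2.2)))).get? (labels[i], labels[j]) else none).or (pvCell m i j) := by
  induction lst generalizing m with
  | nil =>
    have hget : (PySem.Dict.mk ([] : List ((String × String) × Int))).get? (labels[i], labels[j]) = none := rfl
    simp only [pvFwdPass, List.foldl_nil, List.map_nil, hget]
    split_ifs <;> simp
  | cons p lst ih =>
    have hnd2 := hnd
    rw [List.map_cons, List.nodup_cons] at hnd2
    obtain ⟨hhead, hnd'⟩ := hnd2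
    have hstep : pvFwdPass (pvPos labels) (p :: lst) m
        = pvFwdPass (pvPos labels) lst
            (((pvPos labels).getD p.1 []).foldl (fun m ia =>
              (((pvPos labels).getD p.2.1 []).foldl (fun m ib =>
                if ia ≠ ib then pvUpd m ia ib p.2.2 else m) m)) m) := rfl
    have hm1 : pvShape labels.length
        (((pvPos labels).getD p.1 []).foldl (fun m ia =>
          (((pvPos labels).getD p.2.1 []).foldl (fun m ib =>
            if ia ≠ ib then pvUpd m ia ib p.2.2 else m) m)) m) := by
      refine pvShape_foldl _ (fun m ia hm => ?_) _ h
      refine pvShape_foldl _ (fun m ib hm => ?_) _ hm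
      split_ifs
      exacts [pvShape_upd hm _ _ _, hm]
    rw [hstep, ih hnd' hm1, pvCell_double' h hi hj]
    simp only [pv_mem_pos, List.getElem?_eq_getElem hi, List.getElem?_eq_getElem hj,
      Option.some_inj, List.map_cons, PySem.Dict.get?_mk_cons]
    by_cases hij : i = j
    · subst hij
      simp
    · by_cases hk : p.1 = labels[i] ∧ p.2.1 = labels[j]
      · have hbeq : (((p.1, p.2.1) : String × String) == (labels[i], labels[j])) = true := by
          rw [beq_iff_eq]
          exact Prod.ext hk.1 hk.2
        have htail : (PySem.Dict.mk (lst.map (fun p => ((p.1, p.2.1), p.2.2)))).get? (p.1, p.2.1) = none := by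
          rw [PySem.Dict.get?_eq_none_iff_not_mem_keys, PySem.Dict.keys_mk]
          simpa [Function.comp] using hhead
        simp [hij, hk.1.symm, hk.2.symm, hbeq, htail]
      · have hbeq : (((p.1, p.2.1) : String × String) == (labels[i], labels[j])) = false := by
          rw [beq_eq_false_iff_ne]
          intro he
          exact hk ⟨congrArg Prod.fst he, congrArg Prod.snd he⟩
        have hcond : ¬ (labels[i] = p.1 ∧ labels[j] = p.2.1 ∧ i ≠ j) := by
          rintro ⟨h1, h2, _⟩
          exact hk ⟨h1.symm, h2.symm⟩
        rw [if_neg hcond]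
        simp [hbeq]

lemma pvShape_revPass {n : Nat} (pos : PySem.Dict String (List Nat)) (lst : List (String × String × Int))
    {m : List (List (Option Int))} (h : pvShape n m) : pvShape n (pvRevPass pos lst m) := by
  unfold pvRevPass
  refine pvShape_foldl _ (fun m p hm => ?_) lst h
  refine pvShape_foldl _ (fun m ib hm => ?_) _ hm
  refine pvShape_foldl _ (fun m ia hm => ?_) _ hm
  split_ifs
  exacts [pvShape_upd hm _ _ _, hm]

lemma pvShape_fwdPass {n : Nat} (pos : PySem.Dict String (List Nat)) (lst : List (String × String × Int))
    {m : List (List (Option Int))} (h : pvShape n m) : pvShape n (pvFwdPass pos lst m) := by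
  unfold pvFwdPass
  refine pvShape_foldl _ (fun m p hm => ?_) lst h
  refine pvShape_foldl _ (fun m ia hm => ?_) _ hm
  refine pvShape_foldl _ (fun m ib hm => ?_) _ hm
  split_ifs
  exacts [pvShape_upd hm _ _ _, hm]

-- A as a map over index pairs
lemma pvA_eq_map (labels : List String) (n_core : List (String × String × Int)) :
    matrix_from_ncore_py labels n_core
      = labels.zipIdx.map (fun pi => labels.zipIdx.map (fun pj =>
          if pi.2 = pj.2 then none
          else ((PySem.Dict.mk (n_core.map (fun p => ((p.1, p.2.1), p.2.2)))).get? (pi.1, pj.1)).orElse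
            (fun _ => (PySem.Dict.mk (n_core.map (fun p => ((p.1, p.2.1), p.2.2)))).get? (pj.1, pi.1)))) := by
  unfold matrix_from_ncore_py
  have hfun : ∀ (pi : String × Nat),
      (fun (row : List (Option Int)) (pj : String × Nat) =>
        if pi.2 = pj.2 then row ++ [(none : Option Int)]
        else row ++ [((PySem.Dict.mk (n_core.map (fun p => ((p.1, p.2.1), p.2.2)))).get? (pi.1, pj.1)).orElse
          (fun _ => (PySem.Dict.mk (n_core.map (fun p => ((p.1, p.2.1), p.2.2)))).get? (pj.1, pi.1))])
      = fun (row : List (Option Int)) (pj : String × Nat) =>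
        row ++ [if pi.2 = pj.2 then none
          else ((PySem.Dict.mk (n_core.map (fun p => ((p.1, p.2.1), p.2.2)))).get? (pi.1, pj.1)).orElse
            (fun _ => (PySem.Dict.mk (n_core.map (fun p => ((p.1, p.2.1), p.2.2)))).get? (pj.1, pi.1))] := by
    intro pi
    funext row pj
    split_ifs <;> rfl
  simp only [hfun, PySem.List.foldl_append_singleton_eq_map, List.nil_append]

-- ===== VERDICT (by name: the statement is the Claim_ definition above) =====
theorem matrix_from_ncore_py_spec : Claim_equal_matrix_from_ncore_py := by
  intro labels n_core _ hpre
  unfold Spec_matrix_from_ncore_py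
  rw [pvA_eq_map]
  have hm0 : pvShape labels.length (List.replicate labels.length (List.replicate labels.length (none : Option Int))) := by
    refine ⟨by simp, ?_⟩
    intro row hr
    simp [List.eq_of_mem_replicate hr]
  have hs : pvShape labels.length (matrix_from_ncore_py_alt labels n_core) := by
    unfold matrix_from_ncore_py_alt
    exact pvShape_fwdPass _ _ (pvShape_revPass _ _ hm0)
  have hcell : ∀ i j (hi : i < labels.length) (hj : j < labels.length),
      pvCell (matrix_from_ncore_py_alt labels n_core) i j
        = (if i = j then none
          else ((PySem.Dict.mk (n_core.map (fun p => ((p.1, p.2.1), p.2.2)))).get? (labels[i]'hi, labels[j]'hj)).orElse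
            (fun _ => (PySem.Dict.mk (n_core.map (fun p => ((p.1, p.2.1), p.2.2)))).get? (labels[j]'hj, labels[i]'hi))) := by
    intro i j hi hj
    unfold matrix_from_ncore_py_alt
    rw [pvCell_fwdPass labels n_core hpre (pvShape_revPass _ _ hm0) hi hj,
        pvCell_revPass labels n_core hpre hm0 hi hj]
    have hm0c : pvCell (List.replicate labels.length (List.replicate labels.length (none : Option Int))) i j = none := by
      simp [pvCell, List.getD_eq_getElem?_getD, List.getElem?_replicate, hi, hj]
    rw [hm0c]
    by_cases hij : i = j
    · simp [hij]
    · have hoe : ∀ (a b : Option Int), (a.orElse fun _ => b) = a.or b := fun a b => by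
        cases a <;> rfl
      simp [hij, hoe, Option.or_none]
  apply List.ext_getElem
  · simp [hs.1]
  · intro i h1 h2
    have hi : i < labels.length := by simpa using h1
    apply List.ext_getElem
    · have := hs.2 _ (List.getElem_mem h2)
      simp [this]
    · intro j hj1 hj2
      have hj : j < labels.length := by simpa using hj1
      have hB : (matrix_from_ncore_py_alt labels n_core)[i][j] = pvCell (matrix_from_ncore_py_alt labels n_core) i j := by
        simp [pvCell, List.getD_eq_getElem?_getD, List.getElem?_eq_getElem h2,
          List.getElem?_eq_getElem hj2]
      rw [hB, hcell i j hi hj]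
      simp [List.getElem_map, List.getElem_zipIdx]
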